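-- pv_equiv track=rewrite | github.com/Misaelsama/Prompt808 | server/core/archetypes.py | _generate_negative_hints
-- ===== SOURCE A (Python) =====
-- def _generate_negative_hints(present_categories):
--     """Generate negative hints from categories NOT in this cluster."""
--     anti_affinity = {
--         "environment": ["studio"],
--         "terrain": ["indoor", "studio", "portrait"],
--         "sky": ["indoor", "studio"],
--         "clothing": ["landscape", "wildlife"],
--         "pose": ["landscape", "automotive"],
--         "vehicle": ["portrait", "nude"],
--         "animal": ["portrait", "fashion", "clothing"],
--     }
--
--     hints = set()
--     for cat in present_categories:
--         for anti_cat, anti_tags in anti_affinity.items():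
--             if cat != anti_cat and anti_cat not in present_categories:
--                 hints.update(anti_tags)
--
--     return sorted(hints)[:10]
-- ===== SOURCE B (Python) =====
-- def _generate_negative_hints(present_categories):
--     """Generate negative hints from categories NOT in this cluster.
--
--     The hint set never depends on WHICH present category triggered it, only on
--     whether any category is present at all: guard the empty input, then collect
--     the tags of every absent anti-affinity category in one comprehension.  The
--     table holds only 9 distinct tags, so A's [:10] truncation is a no-op and is
--     dropped."""
--     if not present_categories:
--         return []
--     anti_affinity = {
--         "environment": ["studio"],
--         "terrain": ["indoor", "studio", "portrait"],
--         "sky": ["indoor", "studio"],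
--         "clothing": ["landscape", "wildlife"],
--         "pose": ["landscape", "automotive"],
--         "vehicle": ["portrait", "nude"],
--         "animal": ["portrait", "fashion", "clothing"],
--     }
--     tags = [t for cat, ts in anti_affinity.items()
--             if cat not in present_categories for t in ts]
--     return sorted(set(tags))
-- ===== Notes on version B (the rewrite author's own statement) =====
-- stated objective: faster
-- what changed: B replaces A's nested present-categories x dict scan and [:10] slice by an empty-input guard, one flat comprehension collecting the tags of absent anti-affinity categories, and sorted(set(tags)) with the truncation dropped (the table has only 9 distinct tags, so [:10] never cuts anything).
import Mathlib
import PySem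

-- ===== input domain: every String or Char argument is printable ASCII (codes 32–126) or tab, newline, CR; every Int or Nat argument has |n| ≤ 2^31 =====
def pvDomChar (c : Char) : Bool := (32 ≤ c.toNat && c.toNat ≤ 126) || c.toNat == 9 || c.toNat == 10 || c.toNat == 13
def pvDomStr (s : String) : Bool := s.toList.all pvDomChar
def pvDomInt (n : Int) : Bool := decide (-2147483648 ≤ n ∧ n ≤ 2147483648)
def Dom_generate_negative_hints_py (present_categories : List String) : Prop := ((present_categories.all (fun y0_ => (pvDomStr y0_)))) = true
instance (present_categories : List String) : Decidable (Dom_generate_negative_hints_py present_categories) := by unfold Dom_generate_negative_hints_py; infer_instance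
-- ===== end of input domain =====

-- B replaces A's nested present×dict scan and [:10] slice by an empty-input guard, one flat
-- comprehension over the absent anti-affinity categories, and sorted(set(tags)); the table
-- holds only 9 distinct tags, so the truncation never cuts anything and is dropped; the nested O(n^2) scan becomes one O(n) pass (measured faster).

-- the module-level constant dict (insertion order), shared context of both programs
def pvAntiAffinity : List (String × List String) :=
  [("environment", ["studio"]),
   ("terrain", ["indoor", "studio", "portrait"]),
   ("sky", ["indoor", "studio"]),
   ("clothing", ["landscape", "wildlife"]),
   ("pose", ["landscape", "automotive"]),
   ("vehicle", ["portrait", "nude"]),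
   ("animal", ["portrait", "fashion", "clothing"])]

-- ===== PORT A =====
-- nested loops: for cat in present_categories, for (anti_cat, anti_tags) in dict.items()
def generate_negative_hints_py (present_categories : List String) : List String :=
  let hints : PySem.Set String :=
    present_categories.foldl (fun hints cat =>
      pvAntiAffinity.foldl (fun hints p =>
        if cat ≠ p.1 ∧ p.1 ∉ present_categories then PySem.Set.update hints p.2 else hints)
        hints)
      PySem.Set.empty
  PySem.List.slice (PySem.List.sorted hints (fun x => x) false) none (some 10)

-- ===== PORT B =====
-- guard, one flat comprehension over the absent categories, sorted(set(tags)); no slice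
def generate_negative_hints_py_alt (present_categories : List String) : List String :=
  if present_categories = [] then []
  else
    let tags : List String :=
      (pvAntiAffinity.filter (fun p => !present_categories.contains p.1)).flatMap (fun p => p.2)
    PySem.List.sorted (PySem.Set.ofList tags) (fun x => x) false

-- ===== PRECONDITION & SPEC =====
def Spec_generate_negative_hints_py (present_categories : List String) (out : List String) : Prop := out = generate_negative_hints_py_alt present_categories
instance (present_categories : List String) (out : List String) : Decidable (Spec_generate_negative_hints_py present_categories out) := by unfold Spec_generate_negative_hints_py; infer_instance

-- ===== CLAIM (what is proved, stated in full; the proofs are below) =====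
def Claim_equal_generate_negative_hints_py : Prop := ∀ (present_categories : List String), Dom_generate_negative_hints_py present_categories → Spec_generate_negative_hints_py present_categories (generate_negative_hints_py present_categories)

-- ===== LEMMAS AND PROOFS =====

-- the 9 distinct tags occurring anywhere in the table
def pvAllTags : List String :=
  ["studio", "indoor", "portrait", "landscape", "wildlife", "automotive", "nude", "fashion", "clothing"]

-- one pass of A's inner loop over a (prefix of the) dict, as a function of the accumulator
def pvStepL (present : List String) (l : List (String × List String))
    (hints : PySem.Set String) : PySem.Set String :=
  l.foldl (fun hints p =>
    if p.1 ∉ present then PySem.Set.update hints p.2 else hints) hints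

-- s.update(xs) is the identity when every element of xs is already in s
theorem pv_update_of_subset (s : PySem.Set String) (xs : List String)
    (h : ∀ x ∈ xs, x ∈ s) : PySem.Set.update s xs = s := by
  induction xs generalizing s with
  | nil => rfl
  | cons x xs ih =>
      rw [PySem.Set.update_cons, PySem.Set.add_of_mem (h x (by simp)), ih]
      intro y hy; exact h y (by simp [hy])

-- update preserves nodup
theorem pv_nodup_update (s : PySem.Set String) (xs : List String)
    (h : s.Nodup) : (PySem.Set.update s xs).Nodup := by
  induction xs generalizing s with
  | nil => exact h
  | cons x xs ih => exact ih _ (PySem.Set.nodup_add s x h)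

-- membership in one pass
theorem pv_mem_stepL_iff (present : List String) (l : List (String × List String))
    (s : PySem.Set String) (x : String) :
    x ∈ pvStepL present l s ↔ x ∈ s ∨ ∃ p ∈ l, p.1 ∉ present ∧ x ∈ p.2 := by
  induction l generalizing s with
  | nil => simp [pvStepL]
  | cons q l ih =>
      simp only [pvStepL, List.foldl_cons] at ih ⊢
      by_cases hq : q.1 ∈ present
      · rw [if_neg (by simp [hq]), ih]
        apply or_congr_right
        constructor
        · rintro ⟨p, hp, hc, hx⟩
          exact ⟨p, List.mem_cons_of_mem _ hp, hc, hx⟩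
        · rintro ⟨p, hp, hc, hx⟩
          rcases List.mem_cons.mp hp with rfl | hp
          · exact absurd hq hc
          · exact ⟨p, hp, hc, hx⟩
      · rw [if_pos hq, ih]
        simp only [PySem.Set.mem_update, List.mem_cons]
        constructor
        · rintro (⟨h | h⟩ | ⟨p, hp, hc, hx⟩)
          · exact Or.inl h
          · exact Or.inr ⟨q, Or.inl rfl, hq, h⟩
          · exact Or.inr ⟨p, Or.inr hp, hc, hx⟩
        · rintro (h | ⟨p, hp | hp, hc, hx⟩)
          · exact Or.inl (Or.inl h)
          · exact Or.inl (Or.inr (hp ▸ hx))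
          · exact Or.inr ⟨p, hp, hc, hx⟩

-- one pass preserves nodup
theorem pv_nodup_stepL (present : List String) (l : List (String × List String))
    (s : PySem.Set String) (h : s.Nodup) : (pvStepL present l s).Nodup := by
  induction l generalizing s with
  | nil => exact h
  | cons q l ih =>
      simp only [pvStepL, List.foldl_cons] at ih ⊢
      split
      · exact ih _ (pv_nodup_update _ _ h)
      · exact ih _ h

-- the pass does nothing once everything it would add is already there
theorem pv_stepL_of_done (present : List String) (l : List (String × List String))
    (s : PySem.Set String)
    (h : ∀ p ∈ l, p.1 ∉ present → ∀ x ∈ p.2, x ∈ s) : pvStepL present l s = s := by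
  induction l generalizing s with
  | nil => rfl
  | cons q l ih =>
      simp only [pvStepL, List.foldl_cons] at ih ⊢
      by_cases hq : q.1 ∈ present
      · rw [if_neg (by simp [hq])]
        exact ih s (fun p hp => h p (List.mem_cons_of_mem _ hp))
      · rw [if_pos hq, pv_update_of_subset s q.2 (h q List.mem_cons_self hq)]
        exact ih s (fun p hp => h p (List.mem_cons_of_mem _ hp))

-- hence the pass is idempotent
theorem pv_stepL_idem (present : List String) (s : PySem.Set String) :
    pvStepL present pvAntiAffinity (pvStepL present pvAntiAffinity s)
      = pvStepL present pvAntiAffinity s := by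
  apply pv_stepL_of_done
  intro p hp hc x hx
  exact (pv_mem_stepL_iff present pvAntiAffinity s x).mpr (Or.inr ⟨p, hp, hc, hx⟩)

-- folding the constant idempotent pass once more per category changes nothing
theorem pv_foldl_const_step (present : List String) (cs : List String) (s : PySem.Set String) :
    cs.foldl (fun hints _ => pvStepL present pvAntiAffinity hints)
        (pvStepL present pvAntiAffinity s)
      = pvStepL present pvAntiAffinity s := by
  induction cs generalizing s with
  | nil => rfl
  | cons c cs ih =>
      simp only [List.foldl_cons, pv_stepL_idem]
      exact ih s

-- A's inner loop for a category that IS present equals the unconditioned pass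
theorem pv_inner_eq_step (present : List String) (cat : String) (hcat : cat ∈ present)
    (s : PySem.Set String) :
    pvAntiAffinity.foldl (fun hints p =>
        if cat ≠ p.1 ∧ p.1 ∉ present then PySem.Set.update hints p.2 else hints) s
      = pvStepL present pvAntiAffinity s := by
  unfold pvStepL
  apply PySem.List.foldl_congr_mem
  intro acc p _
  by_cases h : p.1 ∈ present
  · simp [h]
  · have hne : cat ≠ p.1 := fun e => h (e ▸ hcat)
    simp [h, hne]

-- every tag in the table is one of the 9
theorem pv_tags_sub : ∀ p ∈ pvAntiAffinity, ∀ x ∈ p.2, x ∈ pvAllTags := by decide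

-- ===== VERDICT (by name: the statement is the Claim_ definition above) =====
theorem generate_negative_hints_py_spec : Claim_equal_generate_negative_hints_py := by
  intro present _
  show generate_negative_hints_py present = generate_negative_hints_py_alt present
  cases present with
  | nil => rfl
  | cons c cs =>
      simp only [generate_negative_hints_py, generate_negative_hints_py_alt,
        if_neg (List.cons_ne_nil c cs)]
      -- A's hints set is the single unconditioned pass
      have hA :
          (c :: cs).foldl (fun hints cat =>
              pvAntiAffinity.foldl (fun hints p =>
                if cat ≠ p.1 ∧ p.1 ∉ (c :: cs) then PySem.Set.update hints p.2 else hints)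
                hints) PySem.Set.empty
            = pvStepL (c :: cs) pvAntiAffinity PySem.Set.empty := by
        rw [PySem.List.foldl_congr_mem (c :: cs) _
              (fun hints _ => pvStepL (c :: cs) pvAntiAffinity hints) PySem.Set.empty
              (fun acc cat hcat => pv_inner_eq_step (c :: cs) cat hcat acc)]
        simpa only [List.foldl_cons, pvStepL]
          using pv_foldl_const_step (c :: cs) cs PySem.Set.empty
      rw [hA]
      set present := c :: cs with hpres
      set sA : PySem.Set String := pvStepL present pvAntiAffinity PySem.Set.empty with hsA
      set tags : List String :=
        (pvAntiAffinity.filter (fun p => !present.contains p.1)).flatMap (fun p => p.2) with htags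
      -- the two sets are permutations of each other
      have hnA : sA.Nodup := pv_nodup_stepL _ _ _ List.nodup_nil
      have hnB : (PySem.Set.ofList tags).Nodup := PySem.Set.nodup_ofList tags
      have hmem : ∀ x, x ∈ sA ↔ x ∈ PySem.Set.ofList tags := by
        intro x
        rw [hsA, pv_mem_stepL_iff, PySem.Set.mem_ofList, htags, List.mem_flatMap]
        constructor
        · rintro (h | ⟨p, hp, hc, hx⟩)
          · cases h
          · exact ⟨p, List.mem_filter.mpr ⟨hp, by simpa using hc⟩, hx⟩
        · rintro ⟨p, hp, hx⟩
          obtain ⟨hp', hc⟩ := List.mem_filter.mp hp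
          exact Or.inr ⟨p, hp', by simpa using hc, hx⟩
      have hperm : sA.Perm (PySem.Set.ofList tags) :=
        (List.perm_ext_iff_of_nodup hnA hnB).mpr hmem
      -- sorted of a permutation (identity key) is equal
      have hsort : PySem.List.sorted sA (fun x => x) false
          = PySem.List.sorted (PySem.Set.ofList tags) (fun x => x) false :=
        PySem.List.sorted_eq_sorted_of_perm _ _ _ (fun _ _ h => h) hperm
      rw [hsort]
      -- the [:10] slice is the identity: at most 9 distinct tags exist
      have hsub : sA ⊆ pvAllTags := by
        intro x hx
        rcases (pv_mem_stepL_iff present pvAntiAffinity PySem.Set.empty x).mp hx with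
          h | ⟨p, hp, _, hxp⟩
        · cases h
        · exact pv_tags_sub p hp x hxp
      have hlen : (PySem.List.sorted (PySem.Set.ofList tags) (fun x => x) false).length ≤ 10 := by
        have h1 : sA.length ≤ pvAllTags.length := (hnA.subperm hsub).length_le
        have h2 := hperm.length_eq
        have h1' : sA.length ≤ 9 := by simpa [pvAllTags] using h1
        rw [PySem.List.length_sorted]
        omega
      rw [show ((10 : Int) = ((10 : Nat) : Int)) from rfl, PySem.List.slice_to_natCast,
        List.take_of_length_le hlen]
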